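-- pv_equiv track=rewrite | github.com/Sidekick-Security/reporting-sidekick | lib/processors/m365completion_processor.py | _categorize_m365_finding
-- ===== SOURCE A (Python) =====
-- def _categorize_m365_finding(title: str) -> str:
--     """Categorize M365 finding type based on title"""
--     title_lower = title.lower()
--
--     if any(keyword in title_lower for keyword in ['conditional access', 'mfa', 'authentication', 'access']):
--         return 'Identity and Access Management'
--     elif any(keyword in title_lower for keyword in ['teams', 'sharepoint', 'onedrive', 'collaboration']):
--         return 'Collaboration Security'
--     elif any(keyword in title_lower for keyword in ['azure', 'security defaults', 'tenant']):
--         return 'Azure Security'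
--     elif any(keyword in title_lower for keyword in ['user', 'inactive', 'account', 'password']):
--         return 'User Management'
--     elif any(keyword in title_lower for keyword in ['group', 'permission', 'role']):
--         return 'Permission Management'
--     elif any(keyword in title_lower for keyword in ['data', 'dlp', 'information', 'protection']):
--         return 'Data Protection'
--     else:
--         return 'M365 Configuration'
-- ===== SOURCE B (Python) =====
-- # keyword -> (priority, category): one flat map, single pass tracking the minimum priority
-- _M365_KEYWORDS = {
--     'conditional access': (0, 'Identity and Access Management'),
--     'mfa': (0, 'Identity and Access Management'),
--     'authentication': (0, 'Identity and Access Management'),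
--     'access': (0, 'Identity and Access Management'),
--     'teams': (1, 'Collaboration Security'),
--     'sharepoint': (1, 'Collaboration Security'),
--     'onedrive': (1, 'Collaboration Security'),
--     'collaboration': (1, 'Collaboration Security'),
--     'azure': (2, 'Azure Security'),
--     'security defaults': (2, 'Azure Security'),
--     'tenant': (2, 'Azure Security'),
--     'user': (3, 'User Management'),
--     'inactive': (3, 'User Management'),
--     'account': (3, 'User Management'),
--     'password': (3, 'User Management'),
--     'group': (4, 'Permission Management'),
--     'permission': (4, 'Permission Management'),
--     'role': (4, 'Permission Management'),
--     'data': (5, 'Data Protection'),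
--     'dlp': (5, 'Data Protection'),
--     'information': (5, 'Data Protection'),
--     'protection': (5, 'Data Protection'),
-- }
--
-- def _categorize_m365_finding(title: str) -> str:
--     """Categorize M365 finding type based on title"""
--     t = title.lower()
--     best_p, best_cat = 6, 'M365 Configuration'
--     for kw, (p, cat) in _M365_KEYWORDS.items():
--         if kw in t and p < best_p:
--             best_p, best_cat = p, cat
--     return best_cat
-- ===== Notes on version B (the rewrite author's own statement) =====
-- stated objective: alternative
-- what changed: Replaced the six-branch if/elif early-return chain by one flat keyword->(priority,category) map scanned in a single pass with a running-minimum-priority accumulator (no early exit, no per-category grouping); the minimum priority reproduces the chain's precedence exactly.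
import Mathlib
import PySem

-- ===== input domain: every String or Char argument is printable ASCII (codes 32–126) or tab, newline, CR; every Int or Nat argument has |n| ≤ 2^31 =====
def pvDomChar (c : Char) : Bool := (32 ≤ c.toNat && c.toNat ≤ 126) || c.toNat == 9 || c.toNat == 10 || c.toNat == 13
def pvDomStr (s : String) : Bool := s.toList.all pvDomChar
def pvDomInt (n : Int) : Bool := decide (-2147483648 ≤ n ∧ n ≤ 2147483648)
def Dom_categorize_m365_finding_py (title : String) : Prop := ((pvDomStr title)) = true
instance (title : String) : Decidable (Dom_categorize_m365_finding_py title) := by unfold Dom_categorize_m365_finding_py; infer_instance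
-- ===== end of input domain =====

-- B replaces A's six-branch if/elif chain by one flat keyword->(priority,category) map scanned in a single pass tracking the minimum priority (alternative decomposition; same cost).


-- ===== PORT A =====
def categorize_m365_finding_py (title : String) : String :=
  let title_lower := PySem.Str.lower title
  if (["conditional access", "mfa", "authentication", "access"].any
        (fun keyword => PySem.Str.isIn keyword title_lower)) then
    "Identity and Access Management"
  else if (["teams", "sharepoint", "onedrive", "collaboration"].any
        (fun keyword => PySem.Str.isIn keyword title_lower)) then
    "Collaboration Security"
  else if (["azure", "security defaults", "tenant"].any
        (fun keyword => PySem.Str.isIn keyword title_lower)) then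
    "Azure Security"
  else if (["user", "inactive", "account", "password"].any
        (fun keyword => PySem.Str.isIn keyword title_lower)) then
    "User Management"
  else if (["group", "permission", "role"].any
        (fun keyword => PySem.Str.isIn keyword title_lower)) then
    "Permission Management"
  else if (["data", "dlp", "information", "protection"].any
        (fun keyword => PySem.Str.isIn keyword title_lower)) then
    "Data Protection"
  else
    "M365 Configuration"

-- ===== PORT B =====
-- flat keyword -> (priority, category) map, in Source B's insertion order
def pvM365Keywords : List (String × (Int × String)) :=
  [("conditional access", (0, "Identity and Access Management")),
   ("mfa", (0, "Identity and Access Management")),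
   ("authentication", (0, "Identity and Access Management")),
   ("access", (0, "Identity and Access Management")),
   ("teams", (1, "Collaboration Security")),
   ("sharepoint", (1, "Collaboration Security")),
   ("onedrive", (1, "Collaboration Security")),
   ("collaboration", (1, "Collaboration Security")),
   ("azure", (2, "Azure Security")),
   ("security defaults", (2, "Azure Security")),
   ("tenant", (2, "Azure Security")),
   ("user", (3, "User Management")),
   ("inactive", (3, "User Management")),
   ("account", (3, "User Management")),
   ("password", (3, "User Management")),
   ("group", (4, "Permission Management")),
   ("permission", (4, "Permission Management")),
   ("role", (4, "Permission Management")),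
   ("data", (5, "Data Protection")),
   ("dlp", (5, "Data Protection")),
   ("information", (5, "Data Protection")),
   ("protection", (5, "Data Protection"))]

-- Source B's for-loop: keep the (best_p, best_cat) pair, update when kw in t and p < best_p
def pvScan (t : String) : Int × String → List (String × (Int × String)) → Int × String
  | st, [] => st
  | st, (kw, (p, cat)) :: rest =>
      pvScan t (if PySem.Str.isIn kw t && decide (p < st.1) then (p, cat) else st) rest

def categorize_m365_finding_py_alt (title : String) : String :=
  let t := PySem.Str.lower title
  (pvScan t (6, "M365 Configuration") pvM365Keywords).2

-- ===== PRECONDITION & SPEC =====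
def Spec_categorize_m365_finding_py (title : String) (out : String) : Prop := out = categorize_m365_finding_py_alt title
instance (title : String) (out : String) : Decidable (Spec_categorize_m365_finding_py title out) := by unfold Spec_categorize_m365_finding_py; infer_instance

-- ===== CLAIM =====
def Claim_equal_categorize_m365_finding_py : Prop := ∀ (title : String), Dom_categorize_m365_finding_py title → Spec_categorize_m365_finding_py title (categorize_m365_finding_py title)

-- ===== LEMMAS AND PROOFS =====

theorem pvScan_append (t : String) (st : Int × String) (xs ys : List (String × (Int × String))) :
    pvScan t st (xs ++ ys) = pvScan t (pvScan t st xs) ys := by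
  induction xs generalizing st with
  | nil => rfl
  | cons x rest ih => obtain ⟨kw, p, cat⟩ := x; simp [pvScan, ih]

-- a run of keywords sharing one (priority, category) behaves like a single test of "any keyword matches"
theorem pvScan_const (t : String) (p : Int) (cat : String) (kws : List String) (st : Int × String) :
    pvScan t st (kws.map (fun k => (k, (p, cat)))) =
      if kws.any (fun k => PySem.Str.isIn k t) && decide (p < st.1) then (p, cat) else st := by
  induction kws generalizing st with
  | nil => simp [pvScan]
  | cons k rest ih =>
    simp only [List.map, pvScan, List.any_cons, ih]
    by_cases hk : PySem.Chars.isIn k.toList t.toList = true <;>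
      by_cases hp : p < st.1 <;>
        simp [PySem.Str.isIn, hk, hp]

-- ===== VERDICT =====
theorem categorize_m365_finding_py_spec : Claim_equal_categorize_m365_finding_py := by
  intro title _
  unfold Spec_categorize_m365_finding_py categorize_m365_finding_py categorize_m365_finding_py_alt
  set tl := PySem.Str.lower title with htl
  have hsplit : pvM365Keywords =
      (["conditional access", "mfa", "authentication", "access"].map
        (fun k => (k, ((0 : Int), "Identity and Access Management")))) ++
      (["teams", "sharepoint", "onedrive", "collaboration"].map
        (fun k => (k, ((1 : Int), "Collaboration Security")))) ++
      (["azure", "security defaults", "tenant"].map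
        (fun k => (k, ((2 : Int), "Azure Security")))) ++
      (["user", "inactive", "account", "password"].map
        (fun k => (k, ((3 : Int), "User Management")))) ++
      (["group", "permission", "role"].map
        (fun k => (k, ((4 : Int), "Permission Management")))) ++
      (["data", "dlp", "information", "protection"].map
        (fun k => (k, ((5 : Int), "Data Protection")))) := by rfl
  rw [hsplit]
  simp only [pvScan_append, pvScan_const]
  generalize (["conditional access", "mfa", "authentication", "access"].any
      (fun keyword => PySem.Str.isIn keyword tl)) = a0
  generalize (["teams", "sharepoint", "onedrive", "collaboration"].any
      (fun keyword => PySem.Str.isIn keyword tl)) = a1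
  generalize (["azure", "security defaults", "tenant"].any
      (fun keyword => PySem.Str.isIn keyword tl)) = a2
  generalize (["user", "inactive", "account", "password"].any
      (fun keyword => PySem.Str.isIn keyword tl)) = a3
  generalize (["group", "permission", "role"].any
      (fun keyword => PySem.Str.isIn keyword tl)) = a4
  generalize (["data", "dlp", "information", "protection"].any
      (fun keyword => PySem.Str.isIn keyword tl)) = a5
  revert a0 a1 a2 a3 a4 a5
  decide
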